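-- pv_equiv track=rewrite | github.com/rinward23/AstroEngine | ui/streamlit/pages/08_Lots_Sandbox.py | _collect_required_symbols
-- ===== SOURCE A (Python) =====
-- from collections.abc import Iterable, Sequence
-- from typing import Any
--
-- def _extract_symbols(expr: str) -> set[str]:
--     symbols: set[str] = set()
--     for raw in expr.replace("+", " ").replace("-", " ").split():
--         token = raw.strip()
--         if not token:
--             continue
--         try:
--             float(token)
--         except ValueError:
--             if token.replace("_", "").isalnum():
--                 symbols.add(token)
--     return symbols
--
-- def _collect_required_symbols(
--     lot_names: Iterable[str],
--     sect: str,
--     catalog_map: dict[str, dict[str, Any]],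
-- ) -> set[str]:
--     expr_field = "day" if sect == "day" else "night"
--     required: set[str] = set()
--     visiting: set[str] = set()
--
--     def visit(name: str) -> None:
--         if name in visiting:
--             return
--         visiting.add(name)
--         lot = catalog_map.get(name)
--         if not lot:
--             return
--         expr = lot.get(expr_field, "")
--         for symbol in _extract_symbols(expr):
--             if symbol in catalog_map:
--                 visit(symbol)
--             else:
--                 required.add(symbol)
--
--     for lot_name in lot_names:
--         visit(lot_name)
--
--     return required
-- ===== SOURCE B (Python) =====
-- def _extract_symbols(expr: str) -> set[str]:
--     symbols: set[str] = set()
--     for raw in expr.replace("+", " ").replace("-", " ").split():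
--         token = raw.strip()
--         if not token:
--             continue
--         try:
--             float(token)
--         except ValueError:
--             if token.replace("_", "").isalnum():
--                 symbols.add(token)
--     return symbols
--
-- def _collect_required_symbols(lot_names, sect, catalog_map):
--     expr_field = "day" if sect == "day" else "night"
--     required: set[str] = set()
--     visited: set[str] = set()
--     # task stack: ("visit", name) expands a lot, ("emit", name) records an external symbol
--     stack = [("visit", name) for name in lot_names]
--     stack.reverse()
--     while stack:
--         kind, name = stack.pop()
--         if kind == "emit":
--             required.add(name)
--             continue
--         if name in visited:
--             continue
--         visited.add(name)
--         lot = catalog_map.get(name)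
--         if not lot:
--             continue
--         tasks = [("visit" if s in catalog_map else "emit", s)
--                  for s in _extract_symbols(lot.get(expr_field, ""))]
--         tasks.reverse()
--         stack.extend(tasks)
--     return required
-- ===== Notes on version B (the rewrite author's own statement) =====
-- stated objective: alternative
-- what changed: A's recursive `visit` closure is replaced by an iterative DFS: an explicit stack of visit/emit tasks with a visited set, popped in a while loop (the helper _extract_symbols is kept unchanged).
import Mathlib
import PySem

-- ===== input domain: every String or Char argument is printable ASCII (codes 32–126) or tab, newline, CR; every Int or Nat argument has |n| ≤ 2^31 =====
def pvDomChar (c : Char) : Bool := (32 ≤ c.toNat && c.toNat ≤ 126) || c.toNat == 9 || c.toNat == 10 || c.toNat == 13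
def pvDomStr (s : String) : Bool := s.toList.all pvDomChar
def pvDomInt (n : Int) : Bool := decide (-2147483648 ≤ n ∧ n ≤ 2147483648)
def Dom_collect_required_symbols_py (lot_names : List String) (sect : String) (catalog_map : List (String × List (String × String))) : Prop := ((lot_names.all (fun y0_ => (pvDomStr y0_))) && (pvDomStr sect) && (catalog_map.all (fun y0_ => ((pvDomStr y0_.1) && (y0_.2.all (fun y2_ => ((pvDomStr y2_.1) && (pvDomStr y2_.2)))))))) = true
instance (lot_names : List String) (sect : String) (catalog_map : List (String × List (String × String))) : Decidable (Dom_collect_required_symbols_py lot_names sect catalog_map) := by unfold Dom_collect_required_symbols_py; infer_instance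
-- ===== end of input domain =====

-- B replaces A's recursive `visit` closure by an explicit task stack (iterative DFS); objective: alternative decomposition, same cost.

-- ===== SHARED HELPERS (the helper `_extract_symbols` is identical, verbatim, in A and B) =====

-- `float(token)` success test, hand-written (PySem has no float parser). Exact for the tokens that
-- reach it here: nonempty strings containing no whitespace and no '+'/'-' (both were replaced by
-- spaces before splitting), so no sign and no signed exponent can occur.
-- A digit-underscore run: consumes digits, allowing single '_' between digits, returns the rest.
def pyFloatDigits : List Char → List Char
  | [] => []
  | c :: r =>
    if c.isDigit then pyFloatDigits r
    else if c = '_' then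
      match r with
      | d :: r2 => if d.isDigit then pyFloatDigits r2 else c :: r
      | [] => [c]
    else c :: r

-- a `digitpart` (at least one digit) at the front; returns the rest, none if no leading digit
def pyFloatDigitpart? : List Char → Option (List Char)
  | [] => none
  | c :: r => if c.isDigit then some (pyFloatDigits r) else none

-- an exponent body: a digitpart consuming everything
def pyFloatExp (l : List Char) : Bool :=
  match pyFloatDigitpart? l with
  | some [] => true
  | _ => false

-- optional exponent then end
def pyFloatTailExp : List Char → Bool
  | [] => true
  | c :: r => if c == 'e' || c == 'E' then pyFloatExp r else false

-- after a leading '.': a digitpart then an optional exponent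
def pyFloatFrac (l : List Char) : Bool :=
  match pyFloatDigitpart? l with
  | some rest => pyFloatTailExp rest
  | none => false

-- numeric literal: [digitpart][.[digitpart]][exponent] with at least one digit before any 'e'
def pyFloatNum : List Char → Bool
  | [] => false
  | c :: r =>
    if c = '.' then pyFloatFrac r
    else
      match pyFloatDigitpart? (c :: r) with
      | none => false
      | some rest =>
        match rest with
        | [] => true
        | d :: r2 =>
          if d = '.' then
            match pyFloatDigitpart? r2 with
            | some rest2 => pyFloatTailExp rest2
            | none => pyFloatTailExp r2
          else pyFloatTailExp rest

def pyFloatOk (t : List Char) : Bool :=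
  let l := PySem.Chars.lower t
  l = ['i','n','f'] || l = ['i','n','f','i','n','i','t','y'] || l = ['n','a','n'] || pyFloatNum t

-- port of `_extract_symbols` (iteration order of the returned Python set is modelled as
-- first-insertion order; both programs consume it only up to set semantics)
def extract_symbols (expr : String) : List String :=
  (PySem.Str.split₀ (PySem.Str.replace (PySem.Str.replace expr "+" " ") "-" " ")).foldl
    (fun symbols raw =>
      let token := PySem.Str.strip raw
      if token.toList = [] then symbols
      else if pyFloatOk token.toList then symbols
      else if PySem.Chars.strIsalnum (PySem.Chars.replace token.toList ['_'] []) then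
        PySem.Set.add symbols token
      else symbols)
    PySem.Set.empty

-- DFS state: the `visiting` (resp. `visited`) set and the `required` set of both programs
structure DfsSt where
  visiting : List String
  required : List String
deriving DecidableEq, Repr

-- ===== PORT A =====

-- the recursive closure `visit`; fuel bounds the recursion depth (the top-level call passes
-- catalog_map.length + 2, which is proved sufficient below — the 0-fuel branch is never taken)
def visitA : Nat → List (String × List (String × String)) → String → DfsSt → String → DfsSt
  | 0, _, _, st, _ => st
  | fuel+1, cm, field, st, name =>
    if name ∈ st.visiting then st
    else
      let st1 : DfsSt := ⟨PySem.Set.add st.visiting name, st.required⟩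
      match PySem.Dict.get? (PySem.Dict.mk cm) name with
      | none => st1
      | some lot =>
        if lot = [] then st1
        else
          (extract_symbols (PySem.Dict.getD (PySem.Dict.mk lot) field "")).foldl
            (fun s sym =>
              if PySem.Dict.contains (PySem.Dict.mk cm) sym then visitA fuel cm field s sym
              else ⟨s.visiting, PySem.Set.add s.required sym⟩) st1

def collect_required_symbols_py (lot_names : List String) (sect : String) (catalog_map : List (String × List (String × String))) : List String :=
  let expr_field := if sect = "day" then "day" else "night"
  (lot_names.foldl (fun st n => visitA (catalog_map.length + 2) catalog_map expr_field st n) ⟨[], []⟩).required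

-- ===== PORT B =====

-- a stack entry of Source B: ("visit", name) or ("emit", name)
inductive PyTask where
  | visit : String → PyTask
  | emit : String → PyTask
deriving DecidableEq, Repr

-- the while loop of Source B.  The Python stack pops from the END and extends with REVERSED task
-- lists, so it is represented here reversed: list head = top of stack, `extend(reversed(tasks))`
-- = `tasks ++ rest`.  fuel bounds the number of iterations (the top-level call passes a bound
-- proved sufficient below — the 0-fuel branch is never taken).
def loopB : Nat → List (String × List (String × String)) → String → List PyTask → DfsSt → DfsSt
  | 0, _, _, _, st => st
  | fuel+1, cm, field, stack, st =>
    match stack with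
    | [] => st
    | PyTask.emit name :: rest =>
        loopB fuel cm field rest ⟨st.visiting, PySem.Set.add st.required name⟩
    | PyTask.visit name :: rest =>
        if name ∈ st.visiting then loopB fuel cm field rest st
        else
          let st1 : DfsSt := ⟨PySem.Set.add st.visiting name, st.required⟩
          match PySem.Dict.get? (PySem.Dict.mk cm) name with
          | none => loopB fuel cm field rest st1
          | some lot =>
            if lot = [] then loopB fuel cm field rest st1
            else
              let tasks := (extract_symbols (PySem.Dict.getD (PySem.Dict.mk lot) field "")).map
                (fun s => if PySem.Dict.contains (PySem.Dict.mk cm) s then PyTask.visit s else PyTask.emit s)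
              loopB fuel cm field (tasks ++ rest) st1

-- largest number of symbols any single catalog entry can push (part of B's fuel bound)
def symsBound (cm : List (String × List (String × String))) (field : String) : Nat :=
  cm.foldl (fun m e => max m (extract_symbols (PySem.Dict.getD (PySem.Dict.mk e.2) field "")).length) 0

def collect_required_symbols_py_alt (lot_names : List String) (sect : String) (catalog_map : List (String × List (String × String))) : List String :=
  let expr_field := if sect = "day" then "day" else "night"
  let fuel := lot_names.length + catalog_map.length * (symsBound catalog_map expr_field + 1) + 1
  (loopB fuel catalog_map expr_field (lot_names.map PyTask.visit) ⟨[], []⟩).required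

-- ===== PRECONDITION & SPEC =====
def Spec_collect_required_symbols_py (lot_names : List String) (sect : String) (catalog_map : List (String × List (String × String))) (out : List String) : Prop := out = collect_required_symbols_py_alt lot_names sect catalog_map
instance (lot_names : List String) (sect : String) (catalog_map : List (String × List (String × String))) (out : List String) : Decidable (Spec_collect_required_symbols_py lot_names sect catalog_map out) := by unfold Spec_collect_required_symbols_py; infer_instance

-- ===== CLAIM (what is proved, stated in full; the proofs are below) =====
def Claim_equal_collect_required_symbols_py : Prop := ∀ (lot_names : List String) (sect : String) (catalog_map : List (String × List (String × String))), Dom_collect_required_symbols_py lot_names sect catalog_map → Spec_collect_required_symbols_py lot_names sect catalog_map (collect_required_symbols_py lot_names sect catalog_map)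

-- ===== LEMMAS AND PROOFS =====

-- distinct catalog keys
def keysOf (cm : List (String × List (String × String))) : List String :=
  PySem.List.dedup (cm.map Prod.fst)

-- number of catalog keys not yet visited: the termination measure of A's recursion
def Km (cm : List (String × List (String × String))) (st : DfsSt) : Nat :=
  (keysOf cm).countP (fun k => !(st.visiting.contains k))

-- A's `visit` with exactly enough fuel (the "ideal" recursive visit)
def V (cm : List (String × List (String × String))) (field : String) (st : DfsSt) (name : String) : DfsSt :=
  visitA (Km cm st + 1) cm field st name

-- the effect of one popped task, expressed with the ideal visit
def stepT (cm : List (String × List (String × String))) (field : String) (st : DfsSt) : PyTask → DfsSt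
  | PyTask.visit n => V cm field st n
  | PyTask.emit s => ⟨st.visiting, PySem.Set.add st.required s⟩

lemma subset_add (v : List String) (name : String) : v ⊆ PySem.Set.add v name := by
  intro y hy; exact (PySem.Set.mem_add _ _ _).mpr (Or.inl hy)

lemma foldl_congr_inv {α β : Type} (P : α → Prop) (f g : α → β → α) :
    ∀ (l : List β) (a : α), P a →
    (∀ x ∈ l, ∀ a, P a → P (f a x)) →
    (∀ x ∈ l, ∀ a, P a → f a x = g a x) →
    l.foldl f a = l.foldl g a := by
  intro l
  induction l with
  | nil => intro a _ _ _; rfl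
  | cons x xs ih =>
    intro a hP hpres heq
    simp only [List.foldl_cons]
    rw [← heq x (by simp) a hP]
    exact ih (f a x) (hpres x (by simp) a hP)
      (fun y hy b hb => hpres y (by simp [hy]) b hb)
      (fun y hy b hb => heq y (by simp [hy]) b hb)

lemma foldl_visiting_mono {f : DfsSt → String → DfsSt}
    (h : ∀ a x, a.visiting ⊆ (f a x).visiting) :
    ∀ (l : List String) (a : DfsSt), a.visiting ⊆ (l.foldl f a).visiting := by
  intro l
  induction l with
  | nil => intro a; exact fun _ hy => hy
  | cons x xs ih =>
    intro a
    exact fun y hy => ih (f a x) (h a x hy)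

lemma visitA_mono (fuel : Nat) (cm : List (String × List (String × String))) (field : String) :
    ∀ st name, st.visiting ⊆ (visitA fuel cm field st name).visiting := by
  induction fuel with
  | zero => intro st name; exact fun _ hy => hy
  | succ f ih =>
    intro st name
    simp only [visitA]
    by_cases hv : name ∈ st.visiting
    · simp only [hv, if_true]; exact fun _ hy => hy
    · simp only [hv, if_false]
      cases hget : PySem.Dict.get? (PySem.Dict.mk cm) name with
      | none => exact subset_add _ _
      | some lot =>
        by_cases hlot : lot = []
        · simp only [if_pos hlot]; exact subset_add _ _
        · simp only [if_neg hlot]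
          refine List.Subset.trans (subset_add st.visiting name)
            (foldl_visiting_mono ?_ _ ⟨PySem.Set.add st.visiting name, st.required⟩)
          intro a x
          by_cases hc : PySem.Dict.contains (PySem.Dict.mk cm) x
          · simp only [if_pos hc]; exact ih a x
          · simp only [if_neg hc]; exact fun _ hy => hy

lemma Km_antitone (cm : List (String × List (String × String))) {s t : DfsSt}
    (h : s.visiting ⊆ t.visiting) : Km cm t ≤ Km cm s := by
  unfold Km
  apply List.countP_mono_left
  intro k _ hk
  simp only [Bool.not_eq_true', List.contains_eq_mem, decide_eq_false_iff_not] at *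
  exact fun hs => hk (h hs)

lemma Km_le (cm : List (String × List (String × String))) (st : DfsSt) :
    Km cm st ≤ cm.length := by
  calc Km cm st ≤ (keysOf cm).length := List.countP_le_length
    _ ≤ (cm.map Prod.fst).length := by
        simp only [keysOf, PySem.List.dedup_eq_ofList]
        exact PySem.Set.length_ofList_le _
    _ = cm.length := by simp

lemma mem_keysOf_of_get? {cm : List (String × List (String × String))} {name : String} {lot : List (String × String)}
    (h : PySem.Dict.get? (PySem.Dict.mk cm) name = some lot) : name ∈ keysOf cm := by
  have hm : (name, lot) ∈ cm := PySem.Dict.mem_items_of_get?_eq_some _ h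
  have : name ∈ cm.map Prod.fst := List.mem_map.mpr ⟨(name, lot), hm, rfl⟩
  simpa [keysOf, PySem.List.mem_dedup] using this

lemma Km_add_lt (cm : List (String × List (String × String))) (st : DfsSt) (name : String)
    (hmem : name ∈ keysOf cm) (hnv : name ∉ st.visiting) (req : List String) :
    Km cm ⟨PySem.Set.add st.visiting name, req⟩ < Km cm st := by
  have hadd : PySem.Set.add st.visiting name = st.visiting ++ [name] :=
    PySem.Set.add_of_not_mem hnv
  unfold Km
  simp only [hadd]
  have hfun : (fun k => !((st.visiting ++ [name]).contains k))
      = (fun k => (!(k == name)) && (!(st.visiting.contains k))) := by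
    funext k
    by_cases h1 : k ∈ st.visiting <;> by_cases h2 : k = name <;>
      simp [h1, h2, List.contains_eq_mem]
  rw [hfun]
  rw [List.countP_eq_length_filter, List.countP_eq_length_filter]
  rw [← List.filter_filter]
  set L := (keysOf cm).filter (fun k => !(st.visiting.contains k)) with hL
  have hnd : L.Nodup := by
    apply List.Nodup.filter
    simp only [keysOf, PySem.List.dedup_eq_ofList]
    exact PySem.Set.nodup_ofList _
  have hmemL : name ∈ L := by
    rw [hL]
    refine List.mem_filter.mpr ⟨hmem, ?_⟩
    simp [List.contains_eq_mem, hnv]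
  have herase : L.filter (fun k => !(k == name)) = L.erase name := by
    rw [List.Nodup.erase_eq_filter hnd]
    simp [bne]
  rw [herase]
  have h1 := List.length_erase_of_mem hmemL
  have h2 := List.length_pos_of_mem hmemL
  omega

lemma visitA_stab (cm : List (String × List (String × String))) (field : String) :
    ∀ (m f g : Nat) (st : DfsSt) (name : String), Km cm st ≤ m → m + 1 ≤ f → m + 1 ≤ g →
    visitA f cm field st name = visitA g cm field st name := by
  intro m
  induction m with
  | zero =>
    intro f g st name hK hf hg
    match f, g with
    | f' + 1, g' + 1 =>
      simp only [visitA]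
      by_cases hv : name ∈ st.visiting
      · simp only [hv, if_true]
      · simp only [hv, if_false]
        cases hget : PySem.Dict.get? (PySem.Dict.mk cm) name with
        | none => rfl
        | some lot =>
          by_cases hlot : lot = []
          · simp only [if_pos hlot]
          · exfalso
            have hkey := mem_keysOf_of_get? hget
            have : 0 < Km cm st := by
              rw [Km, List.countP_pos_iff]
              exact ⟨name, hkey, by simp [List.contains_eq_mem, hv]⟩
            omega
  | succ m ih =>
    intro f g st name hK hf hg
    match f, g with
    | f' + 1, g' + 1 =>
      simp only [visitA]
      by_cases hv : name ∈ st.visiting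
      · simp only [hv, if_true]
      · simp only [hv, if_false]
        cases hget : PySem.Dict.get? (PySem.Dict.mk cm) name with
        | none => rfl
        | some lot =>
          by_cases hlot : lot = []
          · simp only [if_pos hlot]
          · simp only [if_neg hlot]
            have hkey := mem_keysOf_of_get? hget
            have hlt : Km cm ⟨PySem.Set.add st.visiting name, st.required⟩ < Km cm st :=
              Km_add_lt cm st name hkey hv st.required
            apply foldl_congr_inv (fun a => (PySem.Set.add st.visiting name) ⊆ a.visiting)
            · exact fun _ hy => hy
            · intro x _ a hPa
              by_cases hc : PySem.Dict.contains (PySem.Dict.mk cm) x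
              · simp only [if_pos hc]
                exact List.Subset.trans hPa (visitA_mono f' cm field a x)
              · simp only [if_neg hc]
                exact hPa
            · intro x _ a hPa
              by_cases hc : PySem.Dict.contains (PySem.Dict.mk cm) x
              · simp only [if_pos hc]
                have h1 : Km cm a ≤ Km cm ⟨PySem.Set.add st.visiting name, st.required⟩ :=
                  Km_antitone cm (s := ⟨PySem.Set.add st.visiting name, st.required⟩) hPa
                exact ih f' g' a x (by omega) (by omega) (by omega)
              · simp only [if_neg hc]

lemma symsBound_spec (cm : List (String × List (String × String))) (field : String)
    {name : String} {lot : List (String × String)}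
    (h : PySem.Dict.get? (PySem.Dict.mk cm) name = some lot) :
    (extract_symbols (PySem.Dict.getD (PySem.Dict.mk lot) field "")).length ≤ symsBound cm field := by
  have hm : (name, lot) ∈ cm := PySem.Dict.mem_items_of_get?_eq_some _ h
  have := (PySem.List.le_foldl_max_nat cm
    (fun e => (extract_symbols (PySem.Dict.getD (PySem.Dict.mk e.2) field "")).length) 0).2
  exact this (name, lot) hm

lemma V_visited {cm : List (String × List (String × String))} {field : String} {st : DfsSt} {name : String}
    (h : name ∈ st.visiting) : V cm field st name = st := by
  simp [V, visitA, h]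

lemma V_none {cm : List (String × List (String × String))} {field : String} {st : DfsSt} {name : String}
    (hv : name ∉ st.visiting) (hget : PySem.Dict.get? (PySem.Dict.mk cm) name = none) :
    V cm field st name = ⟨PySem.Set.add st.visiting name, st.required⟩ := by
  simp [V, visitA, hv, hget]

lemma V_empty {cm : List (String × List (String × String))} {field : String} {st : DfsSt} {name : String}
    {lot : List (String × String)}
    (hv : name ∉ st.visiting) (hget : PySem.Dict.get? (PySem.Dict.mk cm) name = some lot)
    (hlot : lot = []) :
    V cm field st name = ⟨PySem.Set.add st.visiting name, st.required⟩ := by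
  simp [V, visitA, hv, hget, hlot]

lemma V_expand {cm : List (String × List (String × String))} {field : String} {st : DfsSt} {name : String}
    {lot : List (String × String)}
    (hv : name ∉ st.visiting) (hget : PySem.Dict.get? (PySem.Dict.mk cm) name = some lot)
    (hlot : lot ≠ []) :
    V cm field st name =
      (extract_symbols (PySem.Dict.getD (PySem.Dict.mk lot) field "")).foldl
        (fun s sym =>
          if PySem.Dict.contains (PySem.Dict.mk cm) sym then visitA (Km cm st) cm field s sym
          else ⟨s.visiting, PySem.Set.add s.required sym⟩)
        ⟨PySem.Set.add st.visiting name, st.required⟩ := by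
  simp [V, visitA, hv, hget, hlot]

set_option maxHeartbeats 1000000 in
lemma loopB_eq_foldl (cm : List (String × List (String × String))) (field : String) :
    ∀ (fB : Nat) (ts : List PyTask) (st : DfsSt),
    ts.length + Km cm st * (symsBound cm field + 1) ≤ fB →
    loopB fB cm field ts st = ts.foldl (stepT cm field) st := by
  intro fB
  induction fB with
  | zero =>
    intro ts st hb
    have : ts = [] := List.eq_nil_of_length_eq_zero (by omega)
    subst this; rfl
  | succ f ih =>
    intro ts st hb
    cases ts with
    | nil => rfl
    | cons t rest =>
      cases t with
      | emit s =>
        simp only [loopB, List.foldl_cons]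
        have hKm : Km cm (⟨st.visiting, PySem.Set.add st.required s⟩ : DfsSt) = Km cm st := rfl
        rw [ih rest _ (by rw [hKm]; simp at hb; omega)]
        rfl
      | visit n =>
        by_cases hv : n ∈ st.visiting
        · simp only [loopB, hv, if_true, List.foldl_cons]
          rw [ih rest st (by simp at hb; omega)]
          rw [show stepT cm field st (PyTask.visit n) = st from V_visited hv]
        · simp only [loopB, hv, if_false, List.foldl_cons]
          cases hget : PySem.Dict.get? (PySem.Dict.mk cm) n with
          | none =>
            have hKm : Km cm (⟨PySem.Set.add st.visiting n, st.required⟩ : DfsSt) ≤ Km cm st :=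
              Km_antitone cm (subset_add st.visiting n)
            have hKmm : Km cm (⟨PySem.Set.add st.visiting n, st.required⟩ : DfsSt) * (symsBound cm field + 1)
                ≤ Km cm st * (symsBound cm field + 1) := Nat.mul_le_mul_right _ hKm
            rw [ih rest _ (by simp at hb; omega)]
            rw [show stepT cm field st (PyTask.visit n) = ⟨PySem.Set.add st.visiting n, st.required⟩ from V_none hv hget]
          | some lot =>
            by_cases hlot : lot = []
            · simp only [if_pos hlot]
              have hKm : Km cm (⟨PySem.Set.add st.visiting n, st.required⟩ : DfsSt) ≤ Km cm st :=
                Km_antitone cm (subset_add st.visiting n)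
              have hKmm : Km cm (⟨PySem.Set.add st.visiting n, st.required⟩ : DfsSt) * (symsBound cm field + 1)
                  ≤ Km cm st * (symsBound cm field + 1) := Nat.mul_le_mul_right _ hKm
              rw [ih rest _ (by simp at hb; omega)]
              rw [show stepT cm field st (PyTask.visit n) = ⟨PySem.Set.add st.visiting n, st.required⟩ from V_empty hv hget hlot]
            · simp only [if_neg hlot]
              have hkey := mem_keysOf_of_get? hget
              have hlt : Km cm (⟨PySem.Set.add st.visiting n, st.required⟩ : DfsSt) < Km cm st :=
                Km_add_lt cm st n hkey hv st.required
              have hsy : (extract_symbols (PySem.Dict.getD (PySem.Dict.mk lot) field "")).length ≤ symsBound cm field :=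
                symsBound_spec cm field hget
              have hmul : (Km cm (⟨PySem.Set.add st.visiting n, st.required⟩ : DfsSt) + 1) * (symsBound cm field + 1)
                  ≤ Km cm st * (symsBound cm field + 1) := Nat.mul_le_mul_right _ hlt
              have hmul2 : (Km cm (⟨PySem.Set.add st.visiting n, st.required⟩ : DfsSt) + 1) * (symsBound cm field + 1)
                  = Km cm (⟨PySem.Set.add st.visiting n, st.required⟩ : DfsSt) * (symsBound cm field + 1) + (symsBound cm field + 1) := by ring
              rw [ih _ _ (by
                simp only [List.length_append, List.length_map]
                simp at hb
                omega)]
              rw [List.foldl_append]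
              refine congrArg (fun z => List.foldl (stepT cm field) z rest) ?_
              show _ = V cm field st n
              rw [V_expand hv hget hlot]
              rw [List.foldl_map]
              apply foldl_congr_inv (fun a => (PySem.Set.add st.visiting n) ⊆ a.visiting)
              · exact fun _ hy => hy
              · intro x _ a hPa
                by_cases hc : PySem.Dict.contains (PySem.Dict.mk cm) x
                · show (PySem.Set.add st.visiting n) ⊆ (stepT cm field a (if PySem.Dict.contains (PySem.Dict.mk cm) x then PyTask.visit x else PyTask.emit x)).visiting
                  simp only [if_pos hc]
                  show (PySem.Set.add st.visiting n) ⊆ (V cm field a x).visiting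
                  exact List.Subset.trans hPa (visitA_mono (Km cm a + 1) cm field a x)
                · show (PySem.Set.add st.visiting n) ⊆ (stepT cm field a (if PySem.Dict.contains (PySem.Dict.mk cm) x then PyTask.visit x else PyTask.emit x)).visiting
                  simp only [if_neg hc]
                  exact hPa
              · intro x _ a hPa
                by_cases hc : PySem.Dict.contains (PySem.Dict.mk cm) x
                · simp only [if_pos hc]
                  have hKa : Km cm a ≤ Km cm (⟨PySem.Set.add st.visiting n, st.required⟩ : DfsSt) :=
                    Km_antitone cm (s := ⟨PySem.Set.add st.visiting n, st.required⟩) hPa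
                  show V cm field a x = visitA (Km cm st) cm field a x
                  exact visitA_stab cm field (Km cm a) (Km cm a + 1) (Km cm st) a x le_rfl
                    le_rfl (by omega)
                · simp only [if_neg hc]
                  rfl

-- ===== VERDICT (by name: the statement is the Claim_ definition above) =====
theorem collect_required_symbols_py_spec : Claim_equal_collect_required_symbols_py := by
  intro lot_names sect catalog_map _
  unfold Spec_collect_required_symbols_py
  set field := if sect = "day" then "day" else "night" with hfield
  set st0 : DfsSt := (⟨[], []⟩ : DfsSt) with hst0
  have hA : lot_names.foldl (fun st n => visitA (catalog_map.length + 2) catalog_map field st n) st0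
      = lot_names.foldl (fun st n => V catalog_map field st n) st0 := by
    apply PySem.List.foldl_congr_mem
    intro acc x _
    exact visitA_stab catalog_map field (Km catalog_map acc) (catalog_map.length + 2)
      (Km catalog_map acc + 1) acc x le_rfl
      (by have := Km_le catalog_map acc; omega) le_rfl
  have hB : loopB (lot_names.length + catalog_map.length * (symsBound catalog_map field + 1) + 1) catalog_map field
        (lot_names.map PyTask.visit) st0
      = (lot_names.map PyTask.visit).foldl (stepT catalog_map field) st0 := by
    apply loopB_eq_foldl
    have h1 : Km catalog_map st0 ≤ catalog_map.length := Km_le catalog_map st0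
    have h2 : Km catalog_map st0 * (symsBound catalog_map field + 1)
        ≤ catalog_map.length * (symsBound catalog_map field + 1) := Nat.mul_le_mul_right _ h1
    simp only [List.length_map]
    omega
  have key : (lot_names.foldl (fun st n => visitA (catalog_map.length + 2) catalog_map field st n) st0).required
      = (loopB (lot_names.length + catalog_map.length * (symsBound catalog_map field + 1) + 1) catalog_map field
          (lot_names.map PyTask.visit) st0).required := by
    rw [hA, hB, List.foldl_map]
    rfl
  exact key
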